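-- pv_equiv track=rewrite | github.com/mcarc011/Mass-Def | 4dweb.py | TupFind
-- ===== SOURCE A (Python) =====
-- import itertools
--
-- def TupFind(L):
-- 	maps = []
-- 	n = 0
-- 	while n!=len(L)-1:
-- 		mt = []
-- 		for m in range(n,len(L)):
-- 			mt += [(n,m)]
-- 		maps += [mt]
-- 		n+=1
-- 	templist = list(itertools.product(*maps))
-- 	return [[(t[0],t[1]) for t in tmap if t[0]!=t[1]] for tmap in templist]
-- ===== SOURCE B (Python) =====
-- def TupFind(L):
--     # Hand-rolled product built back-to-front with filtering fused in:
--     # no itertools, no post-hoc comprehension over full combinations.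
--     k = len(L)
--     combos = [[]]
--     for n in range(k - 2, -1, -1):
--         combos = [([(n, m)] if n != m else []) + tail
--                   for m in range(n, k) for tail in combos]
--     return combos
-- ===== Notes on version B (the rewrite author's own statement) =====
-- stated objective: alternative
-- what changed: Replaces the while-loop that materialises the factor lists plus itertools.product plus an outer filtering comprehension with a single backwards fold that hand-rolls the product and fuses the n!=m filter into the construction of each combination.
import Mathlib
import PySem

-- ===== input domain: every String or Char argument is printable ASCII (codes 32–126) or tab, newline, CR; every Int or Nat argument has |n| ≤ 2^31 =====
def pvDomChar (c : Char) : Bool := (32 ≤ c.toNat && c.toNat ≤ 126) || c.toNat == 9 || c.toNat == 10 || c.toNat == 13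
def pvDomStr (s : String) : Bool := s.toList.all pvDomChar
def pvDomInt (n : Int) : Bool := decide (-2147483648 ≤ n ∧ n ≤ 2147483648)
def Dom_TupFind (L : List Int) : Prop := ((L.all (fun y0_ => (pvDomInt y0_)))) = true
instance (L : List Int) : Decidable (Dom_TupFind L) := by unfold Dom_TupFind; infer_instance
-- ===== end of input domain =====

-- B replaces itertools.product + an outer filtering comprehension by a backwards fold
-- that hand-rolls the product with the n!=m filter fused in (objective: alternative).
-- A loops forever on the empty list, so Pre_ excludes it.

-- ===== PORT A =====
-- mt = [(n,m) for m in range(n, len(L))]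
def pvMt (n k : Int) : List (Int × Int) :=
  (PySem.List.pyRange n k 1).map (fun m => (n, m))

-- the 'while n != len(L)-1' loop; fuel only makes the (possibly diverging) loop total
def TupFindLoop (k : Int) (fuel : Nat) (n : Int) (maps : List (List (Int × Int))) :
    List (List (Int × Int)) :=
  match fuel with
  | 0 => maps
  | Nat.succ f =>
      if n = k - 1 then maps
      else TupFindLoop k f (n + 1) (maps ++ [pvMt n k])

-- itertools.product(*maps), first factor slowest
def pvProd (ms : List (List (Int × Int))) : List (List (Int × Int)) :=
  ms.foldr (fun l acc => l.flatMap (fun x => acc.map (fun t => x :: t))) [[]]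

def TupFind (L : List Int) : List (List (List Int)) :=
  (pvProd (TupFindLoop (L.length : Int) L.length 0 [])).map (fun tmap =>
    (tmap.filter (fun t => decide (t.1 ≠ t.2))).map (fun t => [t.1, t.2]))

-- ===== PORT B =====
def TupFind_alt (L : List Int) : List (List (List Int)) :=
  (PySem.List.pyRange ((L.length : Int) - 2) (-1) (-1)).foldl
    (fun combos n =>
      (PySem.List.pyRange n (L.length : Int) 1).flatMap (fun m =>
        combos.map (fun tail => (if n ≠ m then [[n, m]] else []) ++ tail)))
    [[]]

-- ===== PRECONDITION & SPEC =====
-- Pre_ excludes only the empty list, on which A's while-loop never terminates.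
def Pre_TupFind (L : List Int) : Prop := L ≠ []
instance (L : List Int) : Decidable (Pre_TupFind L) := by unfold Pre_TupFind; infer_instance
def pvWitness_TupFind : List Int := ([3, 1, 2])

def Spec_TupFind (L : List Int) (out : List (List (List Int))) : Prop := out = TupFind_alt L
instance (L : List Int) (out : List (List (List Int))) : Decidable (Spec_TupFind L out) := by unfold Spec_TupFind; infer_instance

-- ===== CLAIM (what is proved, stated in full; the proofs are below) =====
def Claim_equal_TupFind : Prop := ∀ (L : List Int), Dom_TupFind L → Pre_TupFind L → Spec_TupFind L (TupFind L)

-- ===== LEMMAS AND PROOFS =====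

-- the combinator B folds with
def pvStep (k : Int) (combos : List (List (List Int))) (n : Int) : List (List (List Int)) :=
  (PySem.List.pyRange n k 1).flatMap (fun m =>
    combos.map (fun tail => (if n ≠ m then [[n, m]] else []) ++ tail))

-- the filter+map A applies to each combination
def pvG (tmap : List (Int × Int)) : List (List Int) :=
  (tmap.filter (fun t => decide (t.1 ≠ t.2))).map (fun t => [t.1, t.2])

lemma pvG_cons (x : Int × Int) (t : List (Int × Int)) :
    pvG (x :: t) = (if x.1 ≠ x.2 then [[x.1, x.2]] else []) ++ pvG t := by
  simp [pvG, List.filter_cons]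
  by_cases h : x.1 = x.2 <;> simp [h]

-- A's loop unrolled: starting at n with fuel exceeding the remaining steps,
-- it appends pvMt for every index in range(n, k-1)
lemma loop_eq (k : Int) :
    ∀ (r : Nat) (f : Nat) (n : Int) (maps : List (List (Int × Int))),
      n = k - 1 - (r : Int) → r < f →
      TupFindLoop k f n maps
        = maps ++ (PySem.List.pyRange n (k - 1) 1).map (fun i => pvMt i k) := by
  intro r
  induction r with
  | zero =>
      intro f n maps hn hf
      match f, hf with
      | Nat.succ f, _ =>
        simp [TupFindLoop, hn]
  | succ r ih =>
      intro f n maps hn hf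
      match f, hf with
      | Nat.succ f, hf =>
        have hlt : n < k - 1 := by push_cast at hn; omega
        simp only [TupFindLoop, if_neg (by omega : ¬ n = k - 1)]
        rw [ih f (n + 1) _ (by push_cast at hn ⊢; omega) (by omega)]
        rw [PySem.List.pyRange_one_cons hlt]
        simp

-- product-then-filter equals the fused foldr
lemma prod_map_g (ms : List (List (Int × Int))) :
    (pvProd ms).map pvG
      = ms.foldr (fun mt acc => mt.flatMap (fun x =>
          acc.map (fun tail => (if x.1 ≠ x.2 then [[x.1, x.2]] else []) ++ tail))) [[]] := by
  induction ms with
  | nil => simp [pvProd, pvG]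
  | cons mt rest ih =>
      simp only [pvProd, List.foldr_cons] at *
      rw [List.map_flatMap, ← ih]
      apply List.flatMap_congr
      intro x _
      rw [List.map_map, List.map_map]
      apply List.map_congr_left
      intro t _
      simp [Function.comp, pvG_cons]

-- ===== VERDICT (by name: the statement is the Claim_ definition above) =====
theorem TupFind_spec : Claim_equal_TupFind := by
  intro L _ hpre
  unfold Spec_TupFind TupFind TupFind_alt
  have hk : 1 ≤ L.length := List.length_pos_of_ne_nil hpre
  -- rewrite B's countdown range as a reversed ascending range, and its foldl as a foldr
  rw [PySem.List.pyRange_neg_one_eq_reverse, List.foldl_reverse]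
  rw [show ((-1 : Int) + 1) = 0 by ring]
  rw [show ((L.length : Int) - 2 + 1) = (L.length : Int) - 1 by ring]
  -- characterise A's loop
  rw [loop_eq (L.length : Int) (L.length - 1) L.length 0 [] (by push_cast [Nat.cast_sub hk]; ring) (by omega)]
  simp only [List.nil_append]
  rw [show (fun (tmap : List (Int × Int)) =>
      (tmap.filter (fun t => decide (t.1 ≠ t.2))).map (fun t => [t.1, t.2])) = pvG from rfl]
  rw [prod_map_g, List.foldr_map]
  congr 1
  funext n acc
  simp [pvMt, List.flatMap_map]
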